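-- pv_equiv track=rewrite | github.com/raufA1/smart-cli | src/core/task_classifier.py | _estimate_file_count
-- ===== SOURCE A (Python) =====
-- def _estimate_file_count(request_lower: str) -> int:
--     """Estimate number of files that will be affected."""
--
--     # Multi-file indicators
--     if any(
--         word in request_lower
--         for word in [
--             "project",
--             "application",
--             "system",
--             "multi",
--             "entire",
--             "full",
--             "complete",
--             "all files",
--             "whole",
--         ]
--     ):
--         return 15  # Complex
--
--     # Medium scope indicators
--     if any(
--         word in request_lower
--         for word in [
--             "module",
--             "component",
--             "service",
--             "package",
--             "feature",
--             "class",
--             "interface",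
--             "api",
--         ]
--     ):
--         return 5  # Medium
--
--     # Simple scope indicators
--     if any(
--         word in request_lower
--         for word in [
--             "function",
--             "method",
--             "variable",
--             "fix",
--             "small",
--             "simple",
--             "quick",
--             "minor",
--             "typo",
--             "text",
--             "comment",
--         ]
--     ):
--         return 1  # Micro
--
--     return 3  # Default medium
-- ===== SOURCE B (Python) =====
-- _SEVERITY_TABLE = [
--     (["project", "application", "system", "multi", "entire", "full",
--       "complete", "all files", "whole"], 3),
--     (["module", "component", "service", "package", "feature", "class",
--       "interface", "api"], 2),
--     (["function", "method", "variable", "fix", "small", "simple", "quick",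
--       "minor", "typo", "text", "comment"], 1),
-- ]
--
-- _LEVEL_TO_COUNT = {3: 15, 2: 5, 1: 1}
--
--
-- def _estimate_file_count(request_lower: str) -> int:
--     """Estimate number of files that will be affected (table-driven)."""
--     best = 0
--     for words, level in _SEVERITY_TABLE:
--         if any(word in request_lower for word in words):
--             best = max(best, level)
--     return _LEVEL_TO_COUNT.get(best, 3)
-- ===== Notes on version B (the rewrite author's own statement) =====
-- stated objective: alternative
-- what changed: Replaced the three cascaded if-any-return blocks by a single table-driven pass that accumulates the maximum matching severity level and maps it to a count via a dict lookup with default.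
import Mathlib
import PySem

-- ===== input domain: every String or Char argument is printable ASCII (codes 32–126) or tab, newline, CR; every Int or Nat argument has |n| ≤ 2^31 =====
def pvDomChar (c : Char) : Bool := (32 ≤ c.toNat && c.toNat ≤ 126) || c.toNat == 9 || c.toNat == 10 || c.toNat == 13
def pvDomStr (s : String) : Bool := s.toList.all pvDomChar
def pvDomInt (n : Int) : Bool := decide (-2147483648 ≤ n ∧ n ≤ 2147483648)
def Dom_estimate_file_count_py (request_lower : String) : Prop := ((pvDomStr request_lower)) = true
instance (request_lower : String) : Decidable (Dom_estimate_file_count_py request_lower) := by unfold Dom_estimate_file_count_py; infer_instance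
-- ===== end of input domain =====

-- B replaces A's three cascaded if-any-return blocks with a table-driven max-severity
-- accumulation mapped to a count through a level→count dictionary (objective: alternative).


-- ===== PORT A =====
def estimate_file_count_py (request_lower : String) : Int :=
  if (["project", "application", "system", "multi", "entire", "full",
       "complete", "all files", "whole"].any
        (fun word => PySem.Str.isIn word request_lower)) then 15
  else if (["module", "component", "service", "package", "feature", "class",
            "interface", "api"].any
        (fun word => PySem.Str.isIn word request_lower)) then 5
  else if (["function", "method", "variable", "fix", "small", "simple", "quick",
            "minor", "typo", "text", "comment"].any
        (fun word => PySem.Str.isIn word request_lower)) then 1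
  else 3

-- ===== PORT B =====
def pvSeverityTable : List (List String × Int) :=
  [(["project", "application", "system", "multi", "entire", "full",
     "complete", "all files", "whole"], 3),
   (["module", "component", "service", "package", "feature", "class",
     "interface", "api"], 2),
   (["function", "method", "variable", "fix", "small", "simple", "quick",
     "minor", "typo", "text", "comment"], 1)]

def pvLevelToCount : PySem.Dict Int Int := PySem.Dict.mk [(3, 15), (2, 5), (1, 1)]

def estimate_file_count_py_alt (request_lower : String) : Int :=
  let best := pvSeverityTable.foldl
    (fun best g =>
      if g.1.any (fun word => PySem.Str.isIn word request_lower) then max best g.2 else best) 0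
  PySem.Dict.getD pvLevelToCount best 3

-- ===== PRECONDITION & SPEC =====
def Spec_estimate_file_count_py (request_lower : String) (out : Int) : Prop := out = estimate_file_count_py_alt request_lower
instance (request_lower : String) (out : Int) : Decidable (Spec_estimate_file_count_py request_lower out) := by unfold Spec_estimate_file_count_py; infer_instance

-- ===== CLAIM (what is proved, stated in full; the proofs are below) =====
def Claim_equal_estimate_file_count_py : Prop := ∀ (request_lower : String), Dom_estimate_file_count_py request_lower → Spec_estimate_file_count_py request_lower (estimate_file_count_py request_lower)

-- ===== LEMMAS AND PROOFS =====

-- ===== VERDICT (by name: the statement is the Claim_ definition above) =====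
theorem estimate_file_count_py_spec : Claim_equal_estimate_file_count_py := by
  intro s _
  unfold Spec_estimate_file_count_py estimate_file_count_py estimate_file_count_py_alt pvSeverityTable
  simp only [List.foldl]
  cases h1 : (["project", "application", "system", "multi", "entire", "full",
       "complete", "all files", "whole"].any (fun word => PySem.Str.isIn word s)) <;>
  cases h2 : (["module", "component", "service", "package", "feature", "class",
            "interface", "api"].any (fun word => PySem.Str.isIn word s)) <;>
  cases h3 : (["function", "method", "variable", "fix", "small", "simple", "quick",
            "minor", "typo", "text", "comment"].any (fun word => PySem.Str.isIn word s)) <;>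
  simp only [Bool.false_eq_true, if_true, if_false] <;> unfold pvLevelToCount <;> decide
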